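-- pv_equiv track=rewrite | github.com/FreshGhetto/barca-control-center | parse_data_v2.py | _candidate_shop_positions
-- ===== SOURCE A (Python) =====
-- def normalize_shop_code(shop_str: str) -> str:
--     if not shop_str:
--         return ''
--     code = shop_str.strip().split(' ')[0].strip().upper()
--     # Aliases
--     aliases = {
--         'W': 'WEB',
--         'NU': 'NV',
--         'M2': 'ME2',
--     }
--     if code in aliases:
--         return aliases[code]
--     return code
--
-- def _candidate_shop_positions(row, valid_codes, article_idx=None):
--     """
--     Return ordered candidate tuples (shop_code, idx).
--     Priorities:
--       1) right after detected article code
--       2) known report window where NEGOZIO usually appears (30..50)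
--       3) full-row fallback scan
--     """
--     candidates = []
--     seen = set()
--
--     def add_candidate(idx, cell, priority):
--         if idx is None or idx < 0 or idx >= len(row):
--             return
--         raw = (cell or '').strip()
--         if not raw:
--             return
--         code = normalize_shop_code(raw)
--         if not code or code not in valid_codes:
--             return
--         key = (code, idx)
--         if key in seen:
--             return
--         seen.add(key)
--         candidates.append((priority, idx, code))
--
--     if article_idx is not None:
--         add_candidate(article_idx + 1, row[article_idx + 1] if article_idx + 1 < len(row) else '', 0)
--
--     # Typical "ANALISI ARTICOLI" window.
--     for idx in range(30, min(len(row), 50)):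
--         add_candidate(idx, row[idx], 1)
--
--     # Full-row fallback.
--     for idx, cell in enumerate(row):
--         add_candidate(idx, cell, 2)
--
--     candidates.sort(key=lambda x: (x[0], x[1]))
--     return [(code, idx) for _, idx, code in candidates]
-- ===== SOURCE B (Python) =====
-- def normalize_shop_code(shop_str: str) -> str:
--     if not shop_str:
--         return ''
--     code = shop_str.strip().split(' ')[0].strip().upper()
--     aliases = {
--         'W': 'WEB',
--         'NU': 'NV',
--         'M2': 'ME2',
--     }
--     if code in aliases:
--         return aliases[code]
--     return code
--
-- def _candidate_shop_positions(row, valid_codes, article_idx=None):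
--     """Single pass: assign each valid cell its priority by a closed-form rule
--     on the index, then sort by (priority, idx)."""
--     target = article_idx + 1 if article_idx is not None else None
--     found = []
--     for idx, cell in enumerate(row):
--         raw = (cell or '').strip()
--         if not raw:
--             continue
--         code = normalize_shop_code(raw)
--         if not code or code not in valid_codes:
--             continue
--         if target is not None and idx == target:
--             priority = 0
--         elif 30 <= idx < 50:
--             priority = 1
--         else:
--             priority = 2
--         found.append((priority, idx, code))
--     found.sort(key=lambda t: (t[0], t[1]))
--     return [(code, idx) for _, idx, code in found]
-- ===== Notes on version B (the rewrite author's own statement) =====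
-- stated objective: simpler
-- what changed: B replaces A's three overlapping scans (article-neighbour probe, 30..50 window scan, full-row rescan) plus the `seen` dedup set with one enumerate pass that assigns each valid cell its priority by a closed-form rule on the index, then sorts by (priority, idx).
import Mathlib
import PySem

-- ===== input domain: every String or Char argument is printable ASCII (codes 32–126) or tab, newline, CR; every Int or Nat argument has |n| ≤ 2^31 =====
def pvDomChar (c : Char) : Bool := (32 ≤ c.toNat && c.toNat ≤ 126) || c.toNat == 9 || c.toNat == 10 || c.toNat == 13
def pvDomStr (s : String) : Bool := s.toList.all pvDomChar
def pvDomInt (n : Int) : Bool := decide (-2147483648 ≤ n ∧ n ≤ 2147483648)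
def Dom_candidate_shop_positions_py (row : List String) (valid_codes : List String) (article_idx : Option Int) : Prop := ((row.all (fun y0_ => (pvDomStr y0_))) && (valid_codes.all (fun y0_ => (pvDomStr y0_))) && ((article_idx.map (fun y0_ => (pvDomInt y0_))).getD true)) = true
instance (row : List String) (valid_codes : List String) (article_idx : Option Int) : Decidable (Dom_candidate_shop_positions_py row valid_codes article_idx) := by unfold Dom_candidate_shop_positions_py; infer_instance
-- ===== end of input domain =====

-- B replaces A's three overlapping scans plus the `seen` dedup set with one enumerate
-- pass assigning each valid cell a closed-form priority, then one sort by (priority, idx).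


-- ===== PORT A =====
-- shared helper of both Python files: normalize_shop_code
def normalize_shop_code_py (shop_str : String) : String :=
  if shop_str = "" then ""
  else
    -- shop_str.strip().split(' ')[0].strip().upper(); split? with a nonempty separator
    -- always returns `some` of a nonempty list, so the fallback "" is never taken (exact)
    let first := match PySem.Str.split? (PySem.Str.strip shop_str) " " with
      | some (x :: _) => x
      | _ => ""
    let code := PySem.Str.upper (PySem.Str.strip first)
    let aliases : PySem.Dict String String := PySem.Dict.ofList [("W", "WEB"), ("NU", "NV"), ("M2", "ME2")]
    -- aliases[code] under `code in aliases` never raises: get? is some, getD exact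
    if aliases.contains code then (aliases.get? code).getD code else code

-- A's closure add_candidate, with the mutable (candidates, seen) state explicit
def pvAddCand (row valid_codes : List String)
    (st : List (Int × Int × String) × PySem.Set (String × Int))
    (idx : Option Int) (cell : String) (priority : Int) :
    List (Int × Int × String) × PySem.Set (String × Int) :=
  match idx with
  | none => st
  | some i =>
    if i < 0 ∨ PySem.List.len row ≤ i then st
    else
      let raw := PySem.Str.strip cell   -- (cell or '').strip(): cell is a str here
      if raw = "" then st
      else
        let code := normalize_shop_code_py raw
        if code = "" ∨ code ∉ valid_codes then st
        else
          let key := (code, i)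
          if PySem.Set.contains st.2 key then st
          else (st.1 ++ [(priority, i, code)], PySem.Set.add st.2 key)

def candidate_shop_positions_py (row : List String) (valid_codes : List String) (article_idx : Option Int) : List (String × Int) :=
  let st0 : List (Int × Int × String) × PySem.Set (String × Int) := ([], PySem.Set.empty)
  -- row[article_idx + 1]: pyGetD is exact for -len(row) ≤ article_idx+1 (Pre_ excludes the
  -- IndexError inputs article_idx+1 < -len(row), where Python raises)
  let st1 := match article_idx with
    | none => st0
    | some ai => pvAddCand row valid_codes st0 (some (ai + 1))
        (if ai + 1 < PySem.List.len row then PySem.List.pyGetD row (ai + 1) "" else "") 0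
  -- window 30..min(len(row),50); the index is always in range, so pyGetD is exact
  let st2 := (PySem.List.pyRange 30 (min (PySem.List.len row) 50) 1).foldl
      (fun st i => pvAddCand row valid_codes st (some i) (PySem.List.pyGetD row i "") 1) st1
  let st3 := (PySem.List.enumerate row).foldl
      (fun st p => pvAddCand row valid_codes st (some p.1) p.2 2) st2
  (PySem.List.sorted2 st3.1 (fun x => x.1) (fun x => x.2.1)).map (fun x => (x.2.2, x.2.1))

-- ===== PORT B =====
def candidate_shop_positions_py_alt (row : List String) (valid_codes : List String) (article_idx : Option Int) : List (String × Int) :=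
  let target : Option Int := article_idx.map (fun ai => ai + 1)
  let found := (PySem.List.enumerate row).foldl
    (fun acc p =>
      let raw := PySem.Str.strip p.2
      if raw = "" then acc
      else
        let code := normalize_shop_code_py raw
        if code = "" ∨ code ∉ valid_codes then acc
        else
          let priority : Int :=
            if target = some p.1 then 0
            else if 30 ≤ p.1 ∧ p.1 < 50 then 1
            else 2
          acc ++ [(priority, p.1, code)]) []
  (PySem.List.sorted2 found (fun t => t.1) (fun t => t.2.1)).map (fun t => (t.2.2, t.2.1))

-- ===== PRECONDITION & SPEC =====
-- Pre_ excludes exactly the inputs where Python A raises IndexError: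
-- article_idx given with article_idx + 1 < -len(row) (negative index past the front).
def Pre_candidate_shop_positions_py (row : List String) (valid_codes : List String) (article_idx : Option Int) : Prop :=
  (match article_idx with
   | none => true
   | some ai => decide (-(PySem.List.len row) ≤ ai + 1)) = true
instance (row : List String) (valid_codes : List String) (article_idx : Option Int) : Decidable (Pre_candidate_shop_positions_py row valid_codes article_idx) := by unfold Pre_candidate_shop_positions_py; infer_instance
def pvWitness_candidate_shop_positions_py : List String × List String × Option Int := (["AB", "nv x"], ["AB", "NV"], some 0)

def Spec_candidate_shop_positions_py (row : List String) (valid_codes : List String) (article_idx : Option Int) (out : List (String × Int)) : Prop := out = candidate_shop_positions_py_alt row valid_codes article_idx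
instance (row : List String) (valid_codes : List String) (article_idx : Option Int) (out : List (String × Int)) : Decidable (Spec_candidate_shop_positions_py row valid_codes article_idx out) := by unfold Spec_candidate_shop_positions_py; infer_instance

-- ===== CLAIM (what is proved, stated in full; the proofs are below) =====
def Claim_equal_candidate_shop_positions_py : Prop := ∀ (row : List String) (valid_codes : List String) (article_idx : Option Int), Dom_candidate_shop_positions_py row valid_codes article_idx → Pre_candidate_shop_positions_py row valid_codes article_idx → Spec_candidate_shop_positions_py row valid_codes article_idx (candidate_shop_positions_py row valid_codes article_idx)
-- ===== LEMMAS AND PROOFS =====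

def pvCell (row : List String) (i : Int) : String := PySem.List.pyGetD row i ""
def pvCode (cell : String) : String := normalize_shop_code_py (PySem.Str.strip cell)
def pvOkB (valid_codes : List String) (cell : String) : Bool :=
  !(PySem.Str.strip cell == "") && (!(pvCode cell == "") && valid_codes.contains (pvCode cell))


lemma pvAddCand_some (row valid_codes : List String)
    (st : List (Int × Int × String) × PySem.Set (String × Int)) (i : Int) (cell : String) (p : Int) :
    pvAddCand row valid_codes st (some i) cell p =
      if (decide (0 ≤ i) && decide (i < PySem.List.len row) && pvOkB valid_codes cell) = true then
        (if PySem.Set.contains st.2 (pvCode cell, i) then st.1 else st.1 ++ [(p, i, pvCode cell)],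
         PySem.Set.add st.2 (pvCode cell, i))
      else st := by
  simp only [pvAddCand, pvOkB, pvCode]
  by_cases h1 : i < 0 ∨ PySem.List.len row ≤ i
  · rw [if_pos h1, if_neg]
    simp only [Bool.and_eq_true, decide_eq_true_eq, not_and]
    intro ha hb; exact absurd (by rcases h1 with h | h <;> omega) (by omega)
  · rw [if_neg h1]
    push_neg at h1
    by_cases h2 : PySem.Str.strip cell = ""
    · rw [if_pos h2, if_neg]
      simp [h2]
    · rw [if_neg h2]
      by_cases h3 : normalize_shop_code_py (PySem.Str.strip cell) = "" ∨ normalize_shop_code_py (PySem.Str.strip cell) ∉ valid_codes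
      · rw [if_pos h3, if_neg]
        intro hcond
        simp only [Bool.and_eq_true, decide_eq_true_eq, Bool.not_eq_eq_eq_not, Bool.not_true,
          beq_eq_false_iff_ne, ne_eq] at hcond
        obtain ⟨-, -, hne, hmem⟩ := hcond
        rcases h3 with h3 | h3
        · exact hne h3
        · rw [List.contains_eq_mem, decide_eq_true_eq] at hmem
          exact h3 hmem
      · rw [if_neg h3]
        push_neg at h3
        have hct : (decide (0 ≤ i) && decide (i < PySem.List.len row) &&
            (!(PySem.Str.strip cell == "") && (!(normalize_shop_code_py (PySem.Str.strip cell) == "") &&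
              valid_codes.contains (normalize_shop_code_py (PySem.Str.strip cell))))) = true := by
          have hmemb : valid_codes.contains (normalize_shop_code_py (PySem.Str.strip cell)) = true := by
            rw [List.contains_eq_mem, decide_eq_true_eq]; exact h3.2
          simp only [Bool.and_eq_true, decide_eq_true_eq, Bool.not_eq_eq_eq_not, Bool.not_true,
            beq_eq_false_iff_ne, ne_eq]
          exact ⟨⟨h1.1, h1.2⟩, h2, h3.1, hmemb⟩
        rw [if_pos hct]
        by_cases h4 : st.2.contains (normalize_shop_code_py (PySem.Str.strip cell), i) = true
        · rw [if_pos h4, if_pos h4, PySem.Set.add_of_mem ((PySem.Set.contains_iff _ _).mp h4)]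
        · rw [if_neg h4, if_neg h4]

lemma pvContains_add_ne (s : PySem.Set (String × Int)) (x y : String × Int) (h : y ≠ x) :
    PySem.Set.contains (PySem.Set.add s x) y = PySem.Set.contains s y := by
  rw [Bool.eq_iff_iff, PySem.Set.contains_iff, PySem.Set.contains_iff, PySem.Set.mem_add]
  constructor
  · rintro (hy | hy)
    · exact hy
    · exact absurd hy h
  · exact fun hy => Or.inl hy

lemma pvFold_addCand (row valid_codes : List String) (p : Int) :
    ∀ (l : List (Int × String)) (c : List (Int × Int × String)) (s : PySem.Set (String × Int)),
    (l.map Prod.fst).Nodup →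
    (∀ q ∈ l, 0 ≤ q.1 ∧ q.1 < PySem.List.len row) →
    l.foldl (fun st q => pvAddCand row valid_codes st (some q.1) q.2 p) (c, s) =
      (c ++ (l.filter (fun q => pvOkB valid_codes q.2 && !(PySem.Set.contains s (pvCode q.2, q.1)))).map
          (fun q => (p, q.1, pvCode q.2)),
       PySem.Set.update s ((l.filter (fun q => pvOkB valid_codes q.2)).map (fun q => (pvCode q.2, q.1)))) := by
  intro l
  induction l with
  | nil => intro c s _ _; simp [PySem.Set.update]
  | cons q t ih =>
    intro c s hnd hrange
    have hq := hrange q (List.mem_cons_self)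
    have hndt : (t.map Prod.fst).Nodup := (List.nodup_cons.mp (by simpa using hnd)).2
    have hfst : q.1 ∉ t.map Prod.fst := (List.nodup_cons.mp (by simpa using hnd)).1
    have hranget : ∀ x ∈ t, 0 ≤ x.1 ∧ x.1 < PySem.List.len row :=
      fun x hx => hrange x (List.mem_cons_of_mem _ hx)
    simp only [List.foldl_cons]
    rw [pvAddCand_some]
    by_cases hok : pvOkB valid_codes q.2 = true
    · rw [if_pos (by rw [Bool.and_eq_true, Bool.and_eq_true]
                     exact ⟨⟨by simpa using hq.1, by simpa using hq.2⟩, hok⟩)]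
      by_cases hc : PySem.Set.contains s (pvCode q.2, q.1) = true
      · have hmem : (pvCode q.2, q.1) ∈ s := (PySem.Set.contains_iff s _).mp hc
        rw [if_pos hc, PySem.Set.add_of_mem hmem]
        rw [ih c s hndt hranget]
        simp [List.filter_cons, hok, hc, PySem.Set.update_cons, PySem.Set.add_of_mem hmem]
        rw [if_pos hmem]
      · rw [if_neg hc]
        rw [ih (c ++ [(p, q.1, pvCode q.2)]) (PySem.Set.add s (pvCode q.2, q.1)) hndt hranget]
        have hfc : t.filter (fun x => pvOkB valid_codes x.2 &&
              !(PySem.Set.contains (PySem.Set.add s (pvCode q.2, q.1)) (pvCode x.2, x.1))) =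
            t.filter (fun x => pvOkB valid_codes x.2 && !(PySem.Set.contains s (pvCode x.2, x.1))) := by
          apply List.filter_congr
          intro x hx
          have hne : (pvCode x.2, x.1) ≠ (pvCode q.2, q.1) := by
            intro he
            apply hfst
            have : x.1 = q.1 := congrArg Prod.snd he
            exact this ▸ List.mem_map_of_mem hx
          rw [pvContains_add_ne s _ _ hne]
        have hnmem : (pvCode q.2, q.1) ∉ s := fun h => hc ((PySem.Set.contains_iff s _).mpr h)
        rw [hfc]
        simp [List.filter_cons, hok, hc, PySem.Set.update_cons, List.append_assoc]
        rw [if_neg hnmem]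
        simp [List.append_assoc]
    · rw [if_neg (by simp [hok])]
      rw [ih c s hndt hranget]
      simp [List.filter_cons, hok]

lemma pvFilterMapEq {α β : Type} (p : α → Bool) (f : α → β) :
    ∀ (l : List α), (l.filter p).map f = l.filterMap (fun x => if p x then some (f x) else none) := by
  intro l
  induction l with
  | nil => rfl
  | cons x t ih =>
    by_cases hx : p x = true
    · simp [List.filter_cons, List.filterMap_cons, hx, ih]
    · simp [List.filter_cons, List.filterMap_cons, hx, ih]

lemma pvPermThree {α β : Type} (g g0 g1 g2 : α → Option β) :
    ∀ (l : List α),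
    (∀ x ∈ l, (g x = g0 x ∧ g1 x = none ∧ g2 x = none) ∨
              (g x = g1 x ∧ g0 x = none ∧ g2 x = none) ∨
              (g x = g2 x ∧ g0 x = none ∧ g1 x = none)) →
    (l.filterMap g).Perm (l.filterMap g0 ++ l.filterMap g1 ++ l.filterMap g2) := by
  intro l
  induction l with
  | nil => intro _; simp
  | cons x t ih =>
    intro h
    have hx := h x (List.mem_cons_self)
    have iht := ih (fun y hy => h y (List.mem_cons_of_mem _ hy))
    simp only [List.filterMap_cons]
    rcases hx with ⟨he, h1, h2⟩ | ⟨he, h0, h2⟩ | ⟨he, h0, h1⟩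
    · rw [he, h1, h2]
      cases hg0 : g0 x with
      | none => simpa using iht
      | some b =>
        simp only [List.cons_append]
        exact iht.cons b
    · rw [he, h0, h2]
      cases hg1 : g1 x with
      | none => simpa using iht
      | some b =>
        refine (iht.cons b).trans ?_
        have e1 : t.filterMap g0 ++ t.filterMap g1 ++ t.filterMap g2
            = t.filterMap g0 ++ (t.filterMap g1 ++ t.filterMap g2) := List.append_assoc _ _ _
        have e2 : t.filterMap g0 ++ (b :: t.filterMap g1) ++ t.filterMap g2
            = t.filterMap g0 ++ (b :: (t.filterMap g1 ++ t.filterMap g2)) := by simp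
        rw [e1, e2]
        exact List.perm_middle.symm
    · rw [he, h0, h1]
      cases hg2 : g2 x with
      | none => simpa using iht
      | some b =>
        refine (iht.cons b).trans ?_
        exact List.perm_middle.symm

lemma pvEnum_eq : ∀ (row : List String) (k : Int),
    PySem.List.enumerate row k =
      (PySem.List.pyRange k (k + row.length) 1).map (fun i => (i, PySem.List.pyGetD row (i - k) "")) := by
  intro row
  induction row with
  | nil => intro k; simp [PySem.List.enumerate, PySem.List.pyRange_one_eq_nil (by omega : k + (0:Int) ≤ k)]
  | cons x t ih =>
    intro k
    have hb : (k + ((x :: t).length : Int)) = (k + 1) + (t.length : Int) := by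
      simp [List.length_cons]; omega
    rw [hb]
    have hcons : PySem.List.pyRange k ((k + 1) + (t.length : Int)) 1
        = k :: PySem.List.pyRange (k + 1) ((k + 1) + (t.length : Int)) 1 :=
      PySem.List.pyRange_one_cons (by omega)
    rw [hcons]
    simp only [List.map_cons]
    have hhead : PySem.List.pyGetD (x :: t) (k - k) "" = x := by
      simp [sub_self, PySem.List.pyGetD_zero_cons]
    rw [hhead]
    show PySem.List.enumerate (x :: t) k = _
    have : PySem.List.enumerate (x :: t) k = (k, x) :: PySem.List.enumerate t (k + 1) := rfl
    rw [this, ih (k + 1)]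
    congr 1
    apply List.map_congr_left
    intro i hi
    rw [PySem.List.mem_pyRange_one] at hi
    have h1 : 0 ≤ i - (k + 1) := by omega
    have h2 : i - (k + 1) < (t.length : Int) := by omega
    rw [PySem.List.pyGetD_eq_getElem t "" h1 h2,
        PySem.List.pyGetD_eq_getElem (x :: t) "" (by omega : (0:Int) ≤ i - k)
          (by simp only [List.length_cons]; push_cast; omega)]
    have hidx : (i - k).toNat = (i - (k + 1)).toNat + 1 := by omega
    simp only [hidx, List.getElem_cons_succ]

lemma pvSorted2_eq_sorted (xs : List (Int × Int × String)) :
    PySem.List.sorted2 xs (fun x => x.1) (fun x => x.2.1) =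
      PySem.List.sorted xs (fun x => toLex (x.1, x.2.1)) := by
  have hf : (fun (a b : Int × Int × String) => decide (a.1 < b.1) || !decide (b.1 < a.1) && decide (a.2.1 < b.2.1))
      = (fun (a b : Int × Int × String) => decide (a.1 < b.1) || decide (a.1 = b.1) && decide (a.2.1 < b.2.1)) := by
    funext a b
    by_cases h1 : a.1 < b.1 <;> by_cases h2 : a.1 = b.1 <;>
      by_cases h3 : b.1 < a.1 <;> simp [h1, h2, h3] <;> omega
  simp only [PySem.List.sorted2, PySem.List.sorted]
  congr 1
  funext acc x
  rw [hf]
  simp only [Bool.false_eq_true, if_false]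
  congr 1
  funext a b
  simp [Prod.Lex.lt_iff, Bool.decide_or, Bool.decide_and]

lemma pvSorted2_eq_of_perm (xs ys : List (Int × Int × String))
    (hperm : ys.Perm xs)
    (hpw : List.Pairwise (fun a b => a.1 < b.1 ∨ (a.1 = b.1 ∧ a.2.1 < b.2.1)) ys) :
    PySem.List.sorted2 xs (fun x => x.1) (fun x => x.2.1) = ys := by
  rw [pvSorted2_eq_sorted]
  exact PySem.List.sorted_eq_of_perm_of_pairwise_lt xs ys _ hperm
    (hpw.imp (by intro a b h; rw [Prod.Lex.lt_iff]; simpa using h))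

def pvR (row : List String) : List Int := PySem.List.pyRange 0 (PySem.List.len row) 1
def pvOkI (row valid_codes : List String) (i : Int) : Bool := pvOkB valid_codes (pvCell row i)
def pvCd (row : List String) (i : Int) : String := pvCode (pvCell row i)
def pvWinB (i : Int) : Bool := decide (30 ≤ i) && decide (i < 50)
def pvTgt (article_idx : Option Int) : Option Int := article_idx.map (fun ai => ai + 1)
def pvG0 (row valid_codes : List String) (t? : Option Int) (i : Int) : Option (Int × Int × String) :=
  if ((t? == some i) && pvOkI row valid_codes i) = true then some (0, i, pvCd row i) else none
def pvG1 (row valid_codes : List String) (t? : Option Int) (i : Int) : Option (Int × Int × String) :=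
  if (pvOkI row valid_codes i && !(t? == some i) && pvWinB i) = true then some (1, i, pvCd row i) else none
def pvG2 (row valid_codes : List String) (t? : Option Int) (i : Int) : Option (Int × Int × String) :=
  if (pvOkI row valid_codes i && !(t? == some i) && !(pvWinB i)) = true then some (2, i, pvCd row i) else none
def pvC (row valid_codes : List String) (article_idx : Option Int) : List (Int × Int × String) :=
  (pvR row).filterMap (pvG0 row valid_codes (pvTgt article_idx)) ++
  (pvR row).filterMap (pvG1 row valid_codes (pvTgt article_idx)) ++
  (pvR row).filterMap (pvG2 row valid_codes (pvTgt article_idx))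
def pvHit (row valid_codes : List String) (article_idx : Option Int) : Option Int :=
  match article_idx with
  | none => none
  | some ai =>
    if (decide (0 ≤ ai + 1) && decide (ai + 1 < PySem.List.len row) && pvOkI row valid_codes (ai + 1)) = true
    then some (ai + 1) else none

lemma pvSt1_eq (row valid_codes : List String) (article_idx : Option Int) :
    (match article_idx with
     | none => (([] : List (Int × Int × String)), (PySem.Set.empty : PySem.Set (String × Int)))
     | some ai => pvAddCand row valid_codes ([], PySem.Set.empty) (some (ai + 1))
        (if ai + 1 < PySem.List.len row then PySem.List.pyGetD row (ai + 1) "" else "") 0) =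
    (match pvHit row valid_codes article_idx with
     | none => ([], PySem.Set.empty)
     | some t => ([(0, t, pvCd row t)], [(pvCd row t, t)])) := by
  cases article_idx with
  | none => rfl
  | some ai =>
    simp only [pvHit]
    by_cases hlt : ai + 1 < PySem.List.len row
    · rw [if_pos hlt, pvAddCand_some]
      by_cases hok : (decide (0 ≤ ai + 1) && decide (ai + 1 < PySem.List.len row) &&
          pvOkI row valid_codes (ai + 1)) = true
      · rw [if_pos hok]
        rw [if_pos (by simpa [pvOkI, pvCell] using hok)]
        have : PySem.Set.contains (PySem.Set.empty : PySem.Set (String × Int))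
            (pvCode (PySem.List.pyGetD row (ai + 1) ""), ai + 1) = false := rfl
        simp only [this, Bool.false_eq_true, if_false]
        simp [PySem.Set.add, PySem.Set.empty, pvCd, pvCell, pvCode]
      · rw [if_neg hok]
        rw [if_neg (by simpa [pvOkI, pvCell] using hok)]
    · rw [if_neg hlt, pvAddCand_some]
      rw [if_neg (by intro h
                     simp only [Bool.and_eq_true, decide_eq_true_eq] at h
                     exact hlt h.1.2),
          if_neg (by intro h
                     simp only [Bool.and_eq_true, decide_eq_true_eq] at h
                     exact hlt h.1.2)]

lemma pvTgt_some_iff (article_idx : Option Int) (i : Int) :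
    (pvTgt article_idx == some i) = true ↔ ∃ ai, article_idx = some ai ∧ i = ai + 1 := by
  cases article_idx with
  | none => simp [pvTgt]
  | some ai =>
    simp [pvTgt]
    constructor
    · intro h; exact h.symm
    · intro h; exact h.symm

lemma pvG0_seg (row valid_codes : List String) (article_idx : Option Int) :
    (pvR row).filterMap (pvG0 row valid_codes (pvTgt article_idx)) =
      (match pvHit row valid_codes article_idx with
       | none => []
       | some t => [(0, t, pvCd row t)]) := by
  cases hh : pvHit row valid_codes article_idx with
  | none =>
    apply List.filterMap_eq_nil_iff.mpr
    intro i hi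
    rw [pvG0, if_neg]
    intro hc
    rw [Bool.and_eq_true] at hc
    obtain ⟨ai, hai, hieq⟩ := (pvTgt_some_iff _ _).mp hc.1
    rw [pvR, PySem.List.mem_pyRange_one] at hi
    simp only [pvHit.eq_def, hai] at hh
    rw [if_pos (by simp only [Bool.and_eq_true, decide_eq_true_eq]
                   exact ⟨⟨by omega, by omega⟩, by rw [← hieq]; exact hc.2⟩)] at hh
    exact Option.some_ne_none _ hh
  | some t =>
    have hfacts : (∃ ai, article_idx = some ai ∧ t = ai + 1) ∧ 0 ≤ t ∧ t < PySem.List.len row ∧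
        pvOkI row valid_codes t = true := by
      cases article_idx with
      | none => exact absurd (by simpa [pvHit] using hh) (by simp : ¬ ((none : Option Int) = some t))
      | some ai =>
        simp only [pvHit.eq_def] at hh
        by_cases hc : (decide (0 ≤ ai + 1) && decide (ai + 1 < PySem.List.len row) &&
            pvOkI row valid_codes (ai + 1)) = true
        · rw [if_pos hc] at hh
          obtain rfl : ai + 1 = t := Option.some_injective _ hh
          simp only [Bool.and_eq_true, decide_eq_true_eq] at hc
          exact ⟨⟨ai, rfl, rfl⟩, hc.1.1, hc.1.2, hc.2⟩
        · rw [if_neg hc] at hh; exact absurd hh (by simp : ¬ ((none : Option Int) = some t))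

    obtain ⟨⟨ai, hai, hteq⟩, ht0, htn, hok⟩ := hfacts
    have hsplit : pvR row = PySem.List.pyRange 0 t 1 ++
        (t :: PySem.List.pyRange (t + 1) (PySem.List.len row) 1) := by
      rw [pvR, PySem.List.pyRange_one_append 0 t (PySem.List.len row) ht0 (by omega),
          PySem.List.pyRange_one_cons htn]
    rw [hsplit, List.filterMap_append, List.filterMap_cons]
    have hnone : ∀ i, i ≠ t → pvG0 row valid_codes (pvTgt article_idx) i = none := by
      intro i hne
      rw [pvG0, if_neg]
      intro hc
      rw [Bool.and_eq_true] at hc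
      obtain ⟨ai', hai', hieq⟩ := (pvTgt_some_iff _ _).mp hc.1
      rw [hai] at hai'
      exact hne (by rw [hieq, hteq, Option.some_injective _ hai'])
    rw [List.filterMap_eq_nil_iff.mpr (fun i hi => hnone i (by rw [PySem.List.mem_pyRange_one] at hi; omega)),
        List.filterMap_eq_nil_iff.mpr (fun i hi => hnone i (by rw [PySem.List.mem_pyRange_one] at hi; omega))]
    have hsome : pvG0 row valid_codes (pvTgt article_idx) t = some (0, t, pvCd row t) := by
      rw [pvG0, if_pos]
      rw [Bool.and_eq_true]
      exact ⟨(pvTgt_some_iff _ _).mpr ⟨ai, hai, hteq⟩, hok⟩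
    rw [hsome]
    simp

lemma pvHit_eq_some_iff (row valid_codes : List String) (article_idx : Option Int) (t : Int) :
    pvHit row valid_codes article_idx = some t ↔
      pvTgt article_idx = some t ∧ 0 ≤ t ∧ t < PySem.List.len row ∧
        pvOkI row valid_codes t = true := by
  cases article_idx with
  | none => simp [pvHit, pvTgt]
  | some ai =>
    simp only [pvHit, pvTgt, Option.map_some]
    by_cases hc : (decide (0 ≤ ai + 1) && decide (ai + 1 < PySem.List.len row) &&
        pvOkI row valid_codes (ai + 1)) = true
    · rw [if_pos hc]
      simp only [Bool.and_eq_true, decide_eq_true_eq] at hc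
      constructor
      · intro h
        obtain rfl : ai + 1 = t := Option.some_injective _ h
        exact ⟨rfl, hc.1.1, hc.1.2, hc.2⟩
      · intro h; exact h.1
    · rw [if_neg hc]
      simp only [Bool.and_eq_true, decide_eq_true_eq] at hc
      constructor
      · intro h; exact absurd h (by simp)
      · intro h
        obtain rfl : ai + 1 = t := Option.some_injective _ h.1
        exact absurd ⟨⟨h.2.1, h.2.2.1⟩, h.2.2.2⟩ hc

lemma pvContains_S0 (row valid_codes : List String) (article_idx : Option Int) (i : Int)
    (hi0 : 0 ≤ i) (hin : i < PySem.List.len row) (hok : pvOkI row valid_codes i = true) :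
    PySem.Set.contains
      (match pvHit row valid_codes article_idx with
       | none => (PySem.Set.empty : PySem.Set (String × Int))
       | some t => [(pvCd row t, t)]) (pvCd row i, i) =
    (pvTgt article_idx == some i) := by
  cases hh : pvHit row valid_codes article_idx with
  | none =>
    show (PySem.Set.contains (PySem.Set.empty : PySem.Set (String × Int)) _) = _
    have : (pvTgt article_idx == some i) = false := by
      rw [Bool.eq_false_iff]
      intro hb
      obtain ⟨ai, hai, hieq⟩ := (pvTgt_some_iff _ _).mp hb
      have : pvHit row valid_codes article_idx = some i :=
        (pvHit_eq_some_iff _ _ _ _).mpr ⟨by rw [pvTgt, hai, Option.map_some, hieq], hi0, hin, hok⟩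
      rw [hh] at this
      exact absurd this (by simp)
    rw [this]; rfl
  | some t =>
    obtain ⟨htgt, -, -, -⟩ := (pvHit_eq_some_iff _ _ _ _).mp hh
    rw [htgt]
    by_cases hit : i = t
    · subst hit
      simp [PySem.Set.contains]
    · have h1 : ((pvCd row i, i) == (pvCd row t, t)) = false := by
        rw [Bool.eq_false_iff]
        intro hb
        exact hit (congrArg Prod.snd (eq_of_beq hb))
      have h2 : ((some t : Option Int) == some i) = false := by
        rw [Bool.eq_false_iff]
        intro hb
        exact hit ((Option.some_injective _ (eq_of_beq hb))).symm
      simp only [PySem.Set.contains, List.contains_cons, List.contains_nil, h1, h2, Bool.or_false]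

lemma pvSeg1_eq (row valid_codes : List String) (article_idx : Option Int) :
    (((PySem.List.pyRange 30 (min (PySem.List.len row) 50) 1).map
        (fun i => (i, pvCell row i))).filter
      (fun q => pvOkB valid_codes q.2 &&
        !(PySem.Set.contains
          (match pvHit row valid_codes article_idx with
           | none => (PySem.Set.empty : PySem.Set (String × Int))
           | some t => [(pvCd row t, t)]) (pvCode q.2, q.1)))).map
        (fun q => ((1 : Int), q.1, pvCode q.2)) =
    (PySem.List.pyRange 30 (min (PySem.List.len row) 50) 1).filterMap
      (pvG1 row valid_codes (pvTgt article_idx)) := by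
  rw [List.filter_map, List.map_map, pvFilterMapEq]
  apply List.filterMap_congr
  intro i hi
  rw [PySem.List.mem_pyRange_one] at hi
  have hn : min (PySem.List.len row) 50 ≤ PySem.List.len row := min_le_left _ _
  have h50 : min (PySem.List.len row) 50 ≤ 50 := min_le_right _ _
  have hwin : pvWinB i = true := by
    simp only [pvWinB, Bool.and_eq_true, decide_eq_true_eq]
    omega
  simp only [Function.comp]
  by_cases hok : pvOkI row valid_codes i = true
  · rw [show pvCode (pvCell row i) = pvCd row i from rfl,
        pvContains_S0 row valid_codes article_idx i (by omega) (by omega) hok]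
    rw [pvG1]
    have hokb : pvOkB valid_codes (pvCell row i) = true := hok
    cases hb : (pvTgt article_idx == some i) <;>
      simp [hokb, hwin, hb, pvCd, hok]
  · have hokb : pvOkB valid_codes (pvCell row i) = false := by
      rw [Bool.eq_false_iff]; exact fun h => hok h
    rw [pvG1]
    simp [hokb, pvOkI, hok]

lemma pvG1_restrict (row valid_codes : List String) (t? : Option Int) :
    (pvR row).filterMap (pvG1 row valid_codes t?) =
      (PySem.List.pyRange 30 (min (PySem.List.len row) 50) 1).filterMap
        (pvG1 row valid_codes t?) := by
  have hn : (0 : Int) ≤ PySem.List.len row := by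
    rw [PySem.List.len_eq]; positivity
  have hnone : ∀ i : Int, ¬ (30 ≤ i ∧ i < 50) → pvG1 row valid_codes t? i = none := by
    intro i hiw
    rw [pvG1, if_neg]
    intro hc
    simp only [Bool.and_eq_true, pvWinB, decide_eq_true_eq] at hc
    exact hiw hc.2
  by_cases h30 : PySem.List.len row ≤ 30
  · rw [min_eq_left (by omega), PySem.List.pyRange_one_eq_nil h30]
    exact List.filterMap_eq_nil_iff.mpr fun i hi => hnone i
      (by rw [pvR, PySem.List.mem_pyRange_one] at hi; omega)
  · by_cases h50 : PySem.List.len row ≤ 50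
    · rw [min_eq_left (by omega)]
      rw [pvR, PySem.List.pyRange_one_append 0 30 (PySem.List.len row) (by omega) (by omega),
          List.filterMap_append]
      rw [List.filterMap_eq_nil_iff.mpr fun i hi => hnone i
        (by rw [PySem.List.mem_pyRange_one] at hi; omega), List.nil_append]
    · rw [min_eq_right (by omega)]
      rw [pvR, PySem.List.pyRange_one_append 0 30 (PySem.List.len row) (by omega) (by omega),
          PySem.List.pyRange_one_append 30 50 (PySem.List.len row) (by omega) (by omega),
          List.filterMap_append, List.filterMap_append]
      rw [List.filterMap_eq_nil_iff.mpr fun i hi => hnone i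
        (by rw [PySem.List.mem_pyRange_one] at hi; omega), List.nil_append]
      rw [List.filterMap_eq_nil_iff.mpr (fun i hi => hnone i
        (by rw [PySem.List.mem_pyRange_one] at hi; omega) :
          ∀ i ∈ PySem.List.pyRange 50 (PySem.List.len row) 1, pvG1 row valid_codes t? i = none),
        List.append_nil]

lemma pvContains_S1 (row valid_codes : List String) (article_idx : Option Int) (i : Int)
    (hi0 : 0 ≤ i) (hin : i < PySem.List.len row) (hok : pvOkI row valid_codes i = true) :
    PySem.Set.contains
      (PySem.Set.update
        (match pvHit row valid_codes article_idx with
         | none => (PySem.Set.empty : PySem.Set (String × Int))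
         | some t => [(pvCd row t, t)])
        ((((PySem.List.pyRange 30 (min (PySem.List.len row) 50) 1).map
            (fun j => (j, pvCell row j))).filter
              (fun q => pvOkB valid_codes q.2)).map (fun q => (pvCode q.2, q.1))))
      (pvCd row i, i) =
    ((pvTgt article_idx == some i) || pvWinB i) := by
  rw [Bool.eq_iff_iff, PySem.Set.contains_iff, PySem.Set.mem_update]
  have hS0 := pvContains_S0 row valid_codes article_idx i hi0 hin hok
  rw [Bool.eq_iff_iff, PySem.Set.contains_iff] at hS0
  constructor
  · rintro (h | h)
    · rw [Bool.or_eq_true]; exact Or.inl (hS0.mp h)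
    · rw [List.mem_map] at h
      obtain ⟨q, hq, hkey⟩ := h
      rw [List.mem_filter] at hq
      rw [List.mem_map] at hq
      obtain ⟨⟨j, hj, rfl⟩, -⟩ := hq
      have : j = i := congrArg Prod.snd hkey
      subst this
      rw [PySem.List.mem_pyRange_one] at hj
      rw [Bool.or_eq_true]
      right
      simp only [pvWinB, Bool.and_eq_true, decide_eq_true_eq]
      have := min_le_right (PySem.List.len row) 50
      omega
  · intro h
    rw [Bool.or_eq_true] at h
    rcases h with h | h
    · exact Or.inl (hS0.mpr h)
    · right
      rw [List.mem_map]
      refine ⟨(i, pvCell row i), ?_, rfl⟩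
      rw [List.mem_filter]
      constructor
      · rw [List.mem_map]
        refine ⟨i, ?_, rfl⟩
        rw [PySem.List.mem_pyRange_one]
        simp only [pvWinB, Bool.and_eq_true, decide_eq_true_eq] at h
        constructor
        · omega
        · have h1 : (30 : Int) ≤ PySem.List.len row := by omega
          omega
      · exact hok

lemma pvSeg2_eq (row valid_codes : List String) (article_idx : Option Int) :
    (((pvR row).map (fun i => (i, pvCell row i))).filter
      (fun q => pvOkB valid_codes q.2 &&
        !(PySem.Set.contains
          (PySem.Set.update
            (match pvHit row valid_codes article_idx with
             | none => (PySem.Set.empty : PySem.Set (String × Int))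
             | some t => [(pvCd row t, t)])
            ((((PySem.List.pyRange 30 (min (PySem.List.len row) 50) 1).map
                (fun j => (j, pvCell row j))).filter
                  (fun q => pvOkB valid_codes q.2)).map (fun q => (pvCode q.2, q.1))))
          (pvCode q.2, q.1)))).map
        (fun q => ((2 : Int), q.1, pvCode q.2)) =
    (pvR row).filterMap (pvG2 row valid_codes (pvTgt article_idx)) := by
  rw [List.filter_map, List.map_map, pvFilterMapEq]
  apply List.filterMap_congr
  intro i hi
  rw [pvR, PySem.List.mem_pyRange_one] at hi
  simp only [Function.comp]
  by_cases hok : pvOkI row valid_codes i = true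
  · rw [show pvCode (pvCell row i) = pvCd row i from rfl,
        pvContains_S1 row valid_codes article_idx i (by omega) (by omega) hok]
    rw [pvG2]
    have hokb : pvOkB valid_codes (pvCell row i) = true := hok
    cases hb : (pvTgt article_idx == some i) <;> cases hw : pvWinB i <;>
      simp [hokb, hb, hw, pvCd, hok]
  · have hokb : pvOkB valid_codes (pvCell row i) = false := by
      rw [Bool.eq_false_iff]; exact fun h => hok h
    rw [pvG2]
    simp [hokb, pvOkI, hok]

lemma pvEnum0 (row : List String) :
    PySem.List.enumerate row = (pvR row).map (fun i => (i, pvCell row i)) := by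
  rw [pvEnum_eq row 0, pvR]
  have hb : (0 : Int) + (row.length : Int) = PySem.List.len row := by
    rw [PySem.List.len_eq]; omega
  rw [hb]
  apply List.map_congr_left
  intro i _
  rw [sub_zero, pvCell]

lemma pvFoldMapStep (row valid_codes : List String) (p : Int) (l : List Int)
    (st : List (Int × Int × String) × PySem.Set (String × Int)) :
    l.foldl (fun st i => pvAddCand row valid_codes st (some i) (PySem.List.pyGetD row i "") p) st =
    (l.map (fun i => (i, pvCell row i))).foldl
      (fun st q => pvAddCand row valid_codes st (some q.1) q.2 p) st := by
  rw [List.foldl_map]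
  rfl

lemma pvA_eq (row valid_codes : List String) (article_idx : Option Int) :
    candidate_shop_positions_py row valid_codes article_idx =
      (PySem.List.sorted2 (pvC row valid_codes article_idx) (fun x => x.1) (fun x => x.2.1)).map
        (fun x => (x.2.2, x.2.1)) := by
  simp only [candidate_shop_positions_py]
  rw [pvSt1_eq]
  rw [pvFoldMapStep]
  have hmin_le : min (PySem.List.len row) 50 ≤ PySem.List.len row := min_le_left _ _
  rw [pvFold_addCand row valid_codes 1 _ _ _
      (by rw [List.map_map]
          have : (Prod.fst ∘ fun i => (i, pvCell row i)) = fun (i : Int) => i := rfl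
          rw [this, List.map_id']
          exact PySem.List.nodup_pyRange_one _ _)
      (by intro q hq
          rw [List.mem_map] at hq
          obtain ⟨j, hj, rfl⟩ := hq
          rw [PySem.List.mem_pyRange_one] at hj
          constructor <;> [omega; omega])]
  rw [pvEnum0]
  rw [pvFold_addCand row valid_codes 2 _ _ _
      (by rw [List.map_map]
          have : (Prod.fst ∘ fun i => (i, pvCell row i)) = fun (i : Int) => i := rfl
          rw [this, List.map_id', pvR]
          exact PySem.List.nodup_pyRange_one _ _)
      (by intro q hq
          rw [List.mem_map] at hq
          obtain ⟨j, hj, rfl⟩ := hq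
          rw [pvR, PySem.List.mem_pyRange_one] at hj
          constructor <;> [omega; omega])]
  have hC0 : (match pvHit row valid_codes article_idx with
      | none => (([] : List (Int × Int × String)), (PySem.Set.empty : PySem.Set (String × Int)))
      | some t => ([(0, t, pvCd row t)], [(pvCd row t, t)])).1 =
      (pvR row).filterMap (pvG0 row valid_codes (pvTgt article_idx)) := by
    rw [pvG0_seg]
    cases pvHit row valid_codes article_idx <;> rfl
  have hS0 : (match pvHit row valid_codes article_idx with
      | none => (([] : List (Int × Int × String)), (PySem.Set.empty : PySem.Set (String × Int)))
      | some t => ([(0, t, pvCd row t)], [(pvCd row t, t)])).2 =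
      (match pvHit row valid_codes article_idx with
      | none => (PySem.Set.empty : PySem.Set (String × Int))
      | some t => [(pvCd row t, t)]) := by
    cases pvHit row valid_codes article_idx <;> rfl
  rw [hC0, hS0]
  rw [pvSeg1_eq row valid_codes article_idx, ← pvG1_restrict]
  rw [pvSeg2_eq row valid_codes article_idx]
  rfl



def pvGB (row valid_codes : List String) (t? : Option Int) (i : Int) : Option (Int × Int × String) :=
  if pvOkB valid_codes (pvCell row i) = true then
    some ((if t? = some i then (0 : Int) else if 30 ≤ i ∧ i < 50 then 1 else 2), i, pvCode (pvCell row i))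
  else none

lemma pvB_eq (row valid_codes : List String) (article_idx : Option Int) :
    candidate_shop_positions_py_alt row valid_codes article_idx =
      (PySem.List.sorted2 ((pvR row).filterMap (pvGB row valid_codes (pvTgt article_idx)))
        (fun x => x.1) (fun x => x.2.1)).map (fun x => (x.2.2, x.2.1)) := by
  simp only [candidate_shop_positions_py_alt]
  rw [pvEnum0]
  rw [PySem.List.foldl_congr_mem _ _
      (fun acc q => if pvOkB valid_codes q.2 = true then
        acc ++ [((if article_idx.map (fun ai => ai + 1) = some q.1 then (0 : Int)
                  else if 30 ≤ q.1 ∧ q.1 < 50 then 1 else 2), q.1, pvCode q.2)]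
        else acc) _
      (by intro acc q _
          dsimp only
          by_cases h2 : PySem.Str.strip q.2 = ""
          · rw [if_pos h2, if_neg (show ¬ (pvOkB valid_codes q.2 = true) by simp [pvOkB, h2])]
          · rw [if_neg h2]
            by_cases h3 : normalize_shop_code_py (PySem.Str.strip q.2) = "" ∨
                normalize_shop_code_py (PySem.Str.strip q.2) ∉ valid_codes
            · rw [if_pos h3, if_neg]
              intro hc
              simp only [pvOkB, pvCode, Bool.and_eq_true, Bool.not_eq_eq_eq_not, Bool.not_true,
                beq_eq_false_iff_ne, ne_eq] at hc
              rcases h3 with h3 | h3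
              · exact hc.2.1 h3
              · rw [List.contains_eq_mem, decide_eq_true_eq] at hc
                exact h3 hc.2.2
            · rw [if_neg h3]
              push_neg at h3
              have hcond : pvOkB valid_codes q.2 = true := by
                simp only [pvOkB, pvCode, Bool.and_eq_true, Bool.not_eq_eq_eq_not, Bool.not_true,
                  beq_eq_false_iff_ne, ne_eq]
                refine ⟨h2, h3.1, ?_⟩
                rw [List.contains_eq_mem, decide_eq_true_eq]
                exact h3.2
              rw [if_pos hcond]
              rfl)]
  rw [PySem.List.foldl_append_if]
  rw [List.nil_append, List.filter_map, List.map_map, pvFilterMapEq]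
  have hfm : (pvR row).filterMap
      (fun x => if ((fun q => pvOkB valid_codes q.2) ∘ fun i => (i, pvCell row i)) x = true then
        some (((fun q => ((if article_idx.map (fun ai => ai + 1) = some q.1 then (0 : Int)
                  else if 30 ≤ q.1 ∧ q.1 < 50 then 1 else 2), q.1, pvCode q.2)) ∘
            fun i => (i, pvCell row i)) x) else none) =
      (pvR row).filterMap (pvGB row valid_codes (pvTgt article_idx)) := by
    apply List.filterMap_congr
    intro i _
    simp only [Function.comp]
    rw [pvGB, pvTgt]
  rw [hfm]


lemma pvGB_perm (row valid_codes : List String) (article_idx : Option Int) :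
    ((pvR row).filterMap (pvGB row valid_codes (pvTgt article_idx))).Perm
      (pvC row valid_codes article_idx) := by
  rw [pvC]
  apply pvPermThree
  intro i _
  by_cases hok : pvOkB valid_codes (pvCell row i) = true
  · by_cases ht : pvTgt article_idx = some i
    · left
      refine ⟨?_, ?_, ?_⟩
      · rw [pvGB, pvG0, if_pos hok, if_pos ht,
            if_pos (by rw [Bool.and_eq_true]
                       exact ⟨by rw [ht]; simp, hok⟩)]
        rfl
      · rw [pvG1, if_neg]
        intro hc
        simp only [Bool.and_eq_true, Bool.not_eq_eq_eq_not, Bool.not_true, beq_eq_false_iff_ne,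
          ne_eq] at hc
        exact hc.1.2 ht
      · rw [pvG2, if_neg]
        intro hc
        simp only [Bool.and_eq_true, Bool.not_eq_eq_eq_not, Bool.not_true, beq_eq_false_iff_ne,
          ne_eq] at hc
        exact hc.1.2 ht
    · have hbeq : (pvTgt article_idx == some i) = false := by
        rw [Bool.eq_false_iff]
        intro hb
        exact ht (eq_of_beq hb)
      by_cases hw : (30 ≤ i ∧ i < 50)
      · have hwb : pvWinB i = true := by
          simp only [pvWinB, Bool.and_eq_true, decide_eq_true_eq]
          exact hw
        right; left
        refine ⟨?_, ?_, ?_⟩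
        · rw [pvGB, pvG1, if_pos hok, if_neg ht, if_pos hw,
              if_pos (by simp only [Bool.and_eq_true]
                         exact ⟨⟨hok, by rw [hbeq]; rfl⟩, hwb⟩)]
          rfl
        · rw [pvG0, if_neg]
          intro hc
          rw [Bool.and_eq_true, hbeq] at hc
          exact Bool.false_ne_true hc.1
        · rw [pvG2, if_neg]
          intro hc
          simp only [Bool.and_eq_true] at hc
          rw [hwb] at hc
          exact Bool.false_ne_true hc.2
      · have hwb : pvWinB i = false := by
          rw [Bool.eq_false_iff]
          intro hb
          simp only [pvWinB, Bool.and_eq_true, decide_eq_true_eq] at hb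
          exact hw hb
        right; right
        refine ⟨?_, ?_, ?_⟩
        · rw [pvGB, pvG2, if_pos hok, if_neg ht, if_neg hw,
              if_pos (by simp only [Bool.and_eq_true]
                         exact ⟨⟨hok, by rw [hbeq]; rfl⟩, by rw [hwb]; rfl⟩)]
          rfl
        · rw [pvG0, if_neg]
          intro hc
          rw [Bool.and_eq_true, hbeq] at hc
          exact Bool.false_ne_true hc.1
        · rw [pvG1, if_neg]
          intro hc
          simp only [Bool.and_eq_true] at hc
          rw [hwb] at hc
          exact Bool.false_ne_true hc.2
  · have hokf : pvOkB valid_codes (pvCell row i) = false := by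
      rw [Bool.eq_false_iff]; exact hok
    left
    refine ⟨?_, ?_, ?_⟩
    · rw [pvGB, pvG0, if_neg (by rw [hokf]; simp), if_neg]
      intro hc
      rw [Bool.and_eq_true] at hc
      exact hok hc.2
    · rw [pvG1, if_neg]
      intro hc
      rw [Bool.and_eq_true, Bool.and_eq_true] at hc
      exact hok hc.1.1
    · rw [pvG2, if_neg]
      intro hc
      rw [Bool.and_eq_true, Bool.and_eq_true] at hc
      exact hok hc.1.1

lemma pvSeg_pairwise (row valid_codes : List String) (k : Int)
    (G : Int → Option (Int × Int × String))
    (hG : ∀ i e, G i = some e → e.1 = k ∧ e.2.1 = i) :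
    List.Pairwise (fun (a b : Int × Int × String) => a.1 < b.1 ∨ (a.1 = b.1 ∧ a.2.1 < b.2.1))
      ((pvR row).filterMap G) := by
  rw [List.pairwise_filterMap]
  apply List.Pairwise.imp ?_ (PySem.List.pairwise_lt_pyRange_one 0 (PySem.List.len row))
  intro a b hab e he e' he'
  obtain ⟨hk, hi⟩ := hG a e he
  obtain ⟨hk', hi'⟩ := hG b e' he'
  right
  exact ⟨by rw [hk, hk'], by rw [hi, hi']; exact hab⟩

lemma pvG0_shape (row valid_codes : List String) (t? : Option Int) :
    ∀ i e, pvG0 row valid_codes t? i = some e → e.1 = 0 ∧ e.2.1 = i := by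
  intro i e h
  rw [pvG0] at h
  split at h
  · obtain rfl := Option.some_injective _ h.symm
    exact ⟨rfl, rfl⟩
  · exact absurd h (by simp)

lemma pvG1_shape (row valid_codes : List String) (t? : Option Int) :
    ∀ i e, pvG1 row valid_codes t? i = some e → e.1 = 1 ∧ e.2.1 = i := by
  intro i e h
  rw [pvG1] at h
  split at h
  · obtain rfl := Option.some_injective _ h.symm
    exact ⟨rfl, rfl⟩
  · exact absurd h (by simp)

lemma pvG2_shape (row valid_codes : List String) (t? : Option Int) :
    ∀ i e, pvG2 row valid_codes t? i = some e → e.1 = 2 ∧ e.2.1 = i := by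
  intro i e h
  rw [pvG2] at h
  split at h
  · obtain rfl := Option.some_injective _ h.symm
    exact ⟨rfl, rfl⟩
  · exact absurd h (by simp)

lemma pvFst_of_mem (row valid_codes : List String) (k : Int)
    (G : Int → Option (Int × Int × String))
    (hG : ∀ i e, G i = some e → e.1 = k ∧ e.2.1 = i) :
    ∀ e ∈ (pvR row).filterMap G, e.1 = k := by
  intro e he
  rw [List.mem_filterMap] at he
  obtain ⟨i, -, hi⟩ := he
  exact (hG i e hi).1

lemma pvC_pairwise (row valid_codes : List String) (article_idx : Option Int) :
    List.Pairwise (fun (a b : Int × Int × String) => a.1 < b.1 ∨ (a.1 = b.1 ∧ a.2.1 < b.2.1))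
      (pvC row valid_codes article_idx) := by
  rw [pvC, List.pairwise_append, List.pairwise_append]
  refine ⟨⟨pvSeg_pairwise row valid_codes 0 _ (pvG0_shape row valid_codes _),
           pvSeg_pairwise row valid_codes 1 _ (pvG1_shape row valid_codes _), ?_⟩,
          pvSeg_pairwise row valid_codes 2 _ (pvG2_shape row valid_codes _), ?_⟩
  · intro a ha b hb
    rw [pvFst_of_mem row valid_codes 0 _ (pvG0_shape row valid_codes _) a ha,
        pvFst_of_mem row valid_codes 1 _ (pvG1_shape row valid_codes _) b hb]
    left; norm_num
  · intro a ha b hb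
    rw [List.mem_append] at ha
    rw [pvFst_of_mem row valid_codes 2 _ (pvG2_shape row valid_codes _) b hb]
    rcases ha with ha | ha
    · rw [pvFst_of_mem row valid_codes 0 _ (pvG0_shape row valid_codes _) a ha]
      left; norm_num
    · rw [pvFst_of_mem row valid_codes 1 _ (pvG1_shape row valid_codes _) a ha]
      left; norm_num

-- ===== VERDICT (by name: the statement is the Claim_ definition above) =====
theorem candidate_shop_positions_py_spec : Claim_equal_candidate_shop_positions_py := by
  intro row valid_codes article_idx _ _
  unfold Spec_candidate_shop_positions_py
  rw [pvA_eq, pvB_eq]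
  rw [pvSorted2_eq_of_perm (pvC row valid_codes article_idx) (pvC row valid_codes article_idx)
      (List.Perm.refl _) (pvC_pairwise row valid_codes article_idx)]
  rw [pvSorted2_eq_of_perm _ (pvC row valid_codes article_idx)
      (pvGB_perm row valid_codes article_idx).symm (pvC_pairwise row valid_codes article_idx)]
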